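-- pv_equiv track=rewrite | github.com/nikhil-codes-hub/ad_revamped | backend/app/services/pattern_generator.py | _extract_optional_attributes
-- ===== SOURCE A (Python) =====
-- from typing import Dict, List, Any, Optional, Set, Tuple
-- from collections import defaultdict
--
-- def _extract_optional_attributes(facts_group: List[Dict[str, Any]]) -> List[str]:
--     """
--     Determine optional attributes by comparing across similar NodeFacts.
--     Attributes present in some but not all facts are considered optional.
--     """
--     if not facts_group:
--         return []
--
--     # Filter out metadata fields (same as _extract_required_attributes)
--     METADATA_FIELDS = {
--         'summary', 'description', 'notes', 'child_count',
--         'confidence', 'node_ordinal', 'missing_elements'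
--     }
--
--     # Count attribute occurrences
--     attr_counts = defaultdict(int)
--     total_facts = len(facts_group)
--
--     for fact in facts_group:
--         attributes = fact.get('attributes', {})
--         for key in attributes.keys():
--             if key not in METADATA_FIELDS:
--                 attr_counts[key] += 1
--
--     # Optional: present in >0 but <100% of facts
--     optional = []
--     for attr, count in attr_counts.items():
--         if 0 < count < total_facts:
--             optional.append(attr)
--
--     return sorted(optional)
-- ===== SOURCE B (Python) =====
-- from typing import Dict, List, Any
--
-- def _extract_optional_attributes(facts_group: List[Dict[str, Any]]) -> List[str]:
--     """Set-based: optional = (union of per-fact key sets) - (intersection of them)."""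
--     if not facts_group:
--         return []
--
--     METADATA_FIELDS = {
--         'summary', 'description', 'notes', 'child_count',
--         'confidence', 'node_ordinal', 'missing_elements'
--     }
--
--     key_sets = [set(fact.get('attributes', {})) - METADATA_FIELDS
--                 for fact in facts_group]
--
--     present_in_some = set()
--     for s in key_sets:
--         present_in_some |= s
--
--     present_in_all = key_sets[0]
--     for s in key_sets[1:]:
--         present_in_all &= s
--
--     return sorted(present_in_some - present_in_all)
-- ===== Notes on version B (the rewrite author's own statement) =====
-- stated objective: alternative
-- what changed: Replaces A's per-key occurrence-counting dict (count attribute occurrences, keep those with 0 < count < len) by pure set algebra: the union of the per-fact filtered key sets minus their intersection, sorted.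
import Mathlib
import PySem

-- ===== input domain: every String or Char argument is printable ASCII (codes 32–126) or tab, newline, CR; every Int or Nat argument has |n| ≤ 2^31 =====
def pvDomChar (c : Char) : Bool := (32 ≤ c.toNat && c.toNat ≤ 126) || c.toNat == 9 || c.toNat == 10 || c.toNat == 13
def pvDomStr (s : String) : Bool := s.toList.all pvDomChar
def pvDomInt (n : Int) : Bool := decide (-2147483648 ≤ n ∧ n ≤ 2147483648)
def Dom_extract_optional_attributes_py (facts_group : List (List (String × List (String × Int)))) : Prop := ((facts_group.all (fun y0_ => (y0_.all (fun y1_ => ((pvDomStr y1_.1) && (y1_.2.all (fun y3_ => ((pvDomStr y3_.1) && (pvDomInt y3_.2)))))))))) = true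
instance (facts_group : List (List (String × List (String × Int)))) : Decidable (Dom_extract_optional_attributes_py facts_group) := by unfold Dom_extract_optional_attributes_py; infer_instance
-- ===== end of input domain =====

-- B replaces A's occurrence-counting dict by union/intersection of per-fact key sets (alternative algorithm, same result).


-- ===== PORT A =====
-- METADATA_FIELDS (a Python set literal; shared by both ports)
def pvMETA : PySem.Set String :=
  PySem.Set.ofList ["summary", "description", "notes", "child_count",
                    "confidence", "node_ordinal", "missing_elements"]

def extract_optional_attributes_py (facts_group : List (List (String × List (String × Int)))) : List String :=
  if facts_group = [] then []
  else
    let total : Int := (facts_group.length : Int)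
    -- for fact in facts_group: for key in fact.get('attributes', {}).keys(): if key not in METADATA_FIELDS: attr_counts[key] += 1
    let attr_counts : PySem.Dict String Int :=
      facts_group.foldl (fun d fact =>
        let attributes := (PySem.Dict.ofList fact).getD "attributes" []
        ((PySem.Dict.ofList attributes).keys).foldl
          (fun d key => if PySem.Set.contains pvMETA key then d else d.modify key 0 (· + 1)) d)
        PySem.Dict.empty
    -- for attr, count in attr_counts.items(): if 0 < count < total_facts: optional.append(attr)
    let optional : List String :=
      attr_counts.items.foldl
        (fun acc p => if 0 < p.2 ∧ p.2 < total then acc ++ [p.1] else acc) []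
    PySem.List.sorted optional (fun x => x) false

-- ===== PORT B =====
-- set(fact.get('attributes', {})) - METADATA_FIELDS
def pvKeySet (fact : List (String × List (String × Int))) : PySem.Set String :=
  PySem.Set.diff
    (PySem.Set.ofList ((PySem.Dict.ofList ((PySem.Dict.ofList fact).getD "attributes" [])).keys))
    pvMETA

def extract_optional_attributes_py_alt (facts_group : List (List (String × List (String × Int)))) : List String :=
  match facts_group with
  | [] => []
  | f :: rest =>
    let headSet := pvKeySet f
    let tailSets := rest.map pvKeySet
    let present_in_some := (headSet :: tailSets).foldl PySem.Set.union PySem.Set.empty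
    let present_in_all := tailSets.foldl PySem.Set.inter headSet
    PySem.List.sorted (PySem.Set.diff present_in_some present_in_all) (fun x => x) false

-- ===== PRECONDITION & SPEC =====
def Spec_extract_optional_attributes_py (facts_group : List (List (String × List (String × Int)))) (out : List String) : Prop := out = extract_optional_attributes_py_alt facts_group
instance (facts_group : List (List (String × List (String × Int)))) (out : List String) : Decidable (Spec_extract_optional_attributes_py facts_group out) := by unfold Spec_extract_optional_attributes_py; infer_instance

-- ===== CLAIM (what is proved, stated in full; the proofs are below) =====
def Claim_equal_extract_optional_attributes_py : Prop := ∀ (facts_group : List (List (String × List (String × Int)))), Dom_extract_optional_attributes_py facts_group → Spec_extract_optional_attributes_py facts_group (extract_optional_attributes_py facts_group)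

-- ===== LEMMAS AND PROOFS =====

-- the non-metadata keys of one fact's attributes dict, in dict order
def pvFkeys (fact : List (String × List (String × Int))) : List String :=
  ((PySem.Dict.ofList ((PySem.Dict.ofList fact).getD "attributes" [])).keys).filter
    (fun k => !PySem.Set.contains pvMETA k)

theorem pvFkeys_nodup (fact : List (String × List (String × Int))) : (pvFkeys fact).Nodup :=
  List.Nodup.filter _ (PySem.Dict.nodup_keys_ofList _)

theorem pvKeySet_eq (fact : List (String × List (String × Int))) : pvKeySet fact = pvFkeys fact := by
  unfold pvKeySet pvFkeys PySem.Set.diff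
  congr 1
  exact PySem.Set.ofList_eq_self_of_nodup _ (PySem.Dict.nodup_keys_ofList _)

theorem pvInner_eq (fact : List (String × List (String × Int))) (d : PySem.Dict String Int) :
    ((PySem.Dict.ofList ((PySem.Dict.ofList fact).getD "attributes" [])).keys).foldl
      (fun d key => if PySem.Set.contains pvMETA key then d else d.modify key 0 (· + 1)) d
    = (pvFkeys fact).foldl (fun d key => d.modify key 0 (· + 1)) d := by
  unfold pvFkeys
  rw [← PySem.List.foldl_if_eq_foldl_filter (p := fun k => !PySem.Set.contains pvMETA k)]
  apply PySem.List.foldl_congr_mem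
  intro acc x _
  cases h : PySem.Set.contains pvMETA x <;> simp

theorem pvCounts_eq (facts_group : List (List (String × List (String × Int)))) :
    (facts_group.foldl (fun d fact =>
        ((PySem.Dict.ofList ((PySem.Dict.ofList fact).getD "attributes" [])).keys).foldl
          (fun d key => if PySem.Set.contains pvMETA key then d else d.modify key 0 (· + 1)) d)
        PySem.Dict.empty)
    = PySem.Dict.counter (facts_group.flatMap pvFkeys) := by
  rw [PySem.Dict.counter, List.flatMap, List.foldl_flatten, List.foldl_map]
  apply PySem.List.foldl_congr_mem
  intro acc f _
  exact pvInner_eq f acc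

-- union fold accumulates the flattened stream as a set
theorem pvUnion_fold (ls : List (List String)) (acc : List String) :
    ls.foldl PySem.Set.union (PySem.Set.ofList acc) = PySem.Set.ofList (acc ++ ls.flatten) := by
  induction ls generalizing acc with
  | nil => simp
  | cons l t ih =>
    have h1 : PySem.Set.union (PySem.Set.ofList acc) l = PySem.Set.ofList (acc ++ l) := by
      rw [PySem.Set.union, PySem.Set.update, PySem.Set.ofList_eq_foldl, PySem.Set.ofList_eq_foldl,
        List.foldl_append]
    simp only [List.foldl_cons, h1, ih, List.flatten_cons, List.append_assoc]

-- membership in the intersection fold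
theorem pvInter_fold (ls : List (List String)) (s : List String) (k : String) :
    k ∈ ls.foldl PySem.Set.inter s ↔ k ∈ s ∧ ∀ l ∈ ls, k ∈ l := by
  induction ls generalizing s with
  | nil => simp
  | cons l t ih =>
    simp only [List.foldl_cons, ih, PySem.Set.mem_inter, List.mem_cons]
    constructor
    · rintro ⟨⟨hs, hl⟩, ht⟩
      exact ⟨hs, fun x hx => hx.elim (fun h => h ▸ hl) (ht x)⟩
    · rintro ⟨hs, hall⟩
      exact ⟨⟨hs, hall l (Or.inl rfl)⟩, fun x hx => hall x (Or.inr hx)⟩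

-- count over the flattened stream never exceeds the number of facts
theorem pvCount_le (fs : List (List (String × List (String × Int)))) (k : String) :
    (fs.flatMap pvFkeys).count k ≤ fs.length := by
  induction fs with
  | nil => simp
  | cons f t ih =>
    have hle : (pvFkeys f).count k ≤ 1 := List.nodup_iff_count_le_one.mp (pvFkeys_nodup f) k
    have : ((f :: t).flatMap pvFkeys).count k = (pvFkeys f).count k + (t.flatMap pvFkeys).count k := by
      simp [List.count_append]
    simp only [List.length_cons]
    omega

-- count over the flattened stream is < number of facts iff some fact misses the key
theorem pvCount_lt (fs : List (List (String × List (String × Int)))) (k : String) :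
    ((fs.flatMap pvFkeys).count k < fs.length) ↔ ∃ f ∈ fs, k ∉ pvFkeys f := by
  induction fs with
  | nil => simp
  | cons f t ih =>
    have hle : (pvFkeys f).count k ≤ 1 := List.nodup_iff_count_le_one.mp (pvFkeys_nodup f) k
    have hcc : ((f :: t).flatMap pvFkeys).count k = (pvFkeys f).count k + (t.flatMap pvFkeys).count k := by
      simp [List.count_append]
    by_cases hk : k ∈ pvFkeys f
    · have h1 : (pvFkeys f).count k = 1 := le_antisymm hle (List.count_pos_iff.mpr hk)
      simp only [hcc, h1, List.length_cons, List.mem_cons]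
      constructor
      · intro h
        obtain ⟨g, hg, hng⟩ := ih.mp (by omega)
        exact ⟨g, Or.inr hg, hng⟩
      · rintro ⟨g, hg, hng⟩
        rcases hg with rfl | hg
        · exact absurd hk hng
        · have := ih.mpr ⟨g, hg, hng⟩; omega
    · have h0 : (pvFkeys f).count k = 0 := List.count_eq_zero.mpr hk
      have hle2 : (t.flatMap pvFkeys).count k ≤ t.length := pvCount_le t k
      simp only [hcc, h0, List.length_cons, List.mem_cons]
      constructor
      · intro _; exact ⟨f, Or.inl rfl, hk⟩
      · intro _; omega

-- the two unsorted lists coincide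
theorem pv_lists (f : List (String × List (String × Int))) (rest : List (List (String × List (String × Int)))) :
    (PySem.Dict.counter ((f :: rest).flatMap pvFkeys)).items.foldl
      (fun acc p => if 0 < p.2 ∧ p.2 < (((f :: rest).length : Nat) : Int) then acc ++ [p.1] else acc) []
    = PySem.Set.diff
        ((pvKeySet f :: rest.map pvKeySet).foldl PySem.Set.union PySem.Set.empty)
        ((rest.map pvKeySet).foldl PySem.Set.inter (pvKeySet f)) := by
  -- A side: items of the counter, filtered
  rw [PySem.Dict.items_counter,
    PySem.List.foldl_append_ite (p := fun p : String × Int => 0 < p.2 ∧ p.2 < (((f :: rest).length : Nat) : Int)) (f := Prod.fst),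
    List.filter_map, List.map_map]
  simp only [Function.comp_def, List.map_id']
  have hks : rest.map pvKeySet = rest.map pvFkeys := List.map_congr_left (fun g _ => pvKeySet_eq g)
  -- B side: union fold is the set of the flattened key stream, diff is a filter
  have hsome : (pvKeySet f :: rest.map pvKeySet).foldl PySem.Set.union PySem.Set.empty
      = PySem.Set.ofList ((f :: rest).flatMap pvFkeys) := by
    have := pvUnion_fold ((pvKeySet f :: rest.map pvKeySet)) []
    simp only [List.nil_append] at this
    rw [show PySem.Set.empty = (PySem.Set.ofList [] : PySem.Set String) from rfl, this]
    rw [hks, pvKeySet_eq]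
    congr 1
  rw [PySem.Set.diff, hsome]
  rw [List.nil_append]
  apply List.filter_congr
  intro k hk
  have hkL : k ∈ (f :: rest).flatMap pvFkeys := (PySem.Set.mem_ofList _ _).mp hk
  have hpos : 0 < ((f :: rest).flatMap pvFkeys).count k := List.count_pos_iff.mpr hkL
  have hall : k ∈ (rest.map pvKeySet).foldl PySem.Set.inter (pvKeySet f)
      ↔ ∀ g ∈ f :: rest, k ∈ pvFkeys g := by
    rw [pvInter_fold]
    simp [pvKeySet_eq]
  have hlt := pvCount_lt (f :: rest) k
  cases hc : PySem.Set.contains ((rest.map pvKeySet).foldl PySem.Set.inter (pvKeySet f)) k with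
  | true =>
    have hmem : ∀ g ∈ f :: rest, k ∈ pvFkeys g := hall.mp (List.mem_of_elem_eq_true hc)
    have : ¬ ∃ g ∈ f :: rest, k ∉ pvFkeys g := by
      rintro ⟨g, hg, hng⟩; exact hng (hmem g hg)
    have hge : ¬ ((f :: rest).flatMap pvFkeys).count k < (f :: rest).length := fun h => this (hlt.mp h)
    simp only [Bool.not_true, decide_eq_false_iff_not]
    intro ⟨_, h2⟩
    exact hge (by exact_mod_cast h2)
  | false =>
    have hnmem : ¬ ∀ g ∈ f :: rest, k ∈ pvFkeys g := by
      intro h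
      have hmem : (List.foldl PySem.Set.inter (pvKeySet f) (rest.map pvKeySet)).contains k = true :=
        List.elem_eq_true_of_mem (hall.mpr h)
      rw [hc] at hmem
      exact Bool.noConfusion hmem
    have : ∃ g ∈ f :: rest, k ∉ pvFkeys g := by
      by_contra hne
      exact hnmem (fun g hg => not_not.mp (fun hn => hne ⟨g, hg, hn⟩))
    have hlt' : ((f :: rest).flatMap pvFkeys).count k < (f :: rest).length := hlt.mpr this
    simp only [Bool.not_false, decide_eq_true_eq]
    exact ⟨by exact_mod_cast hpos, by exact_mod_cast hlt'⟩

-- main theorem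
theorem pv_main (facts_group : List (List (String × List (String × Int)))) :
    extract_optional_attributes_py facts_group = extract_optional_attributes_py_alt facts_group := by
  cases facts_group with
  | nil => rfl
  | cons f rest =>
    rw [extract_optional_attributes_py, if_neg (by simp), extract_optional_attributes_py_alt]
    simp only
    rw [pvCounts_eq, pv_lists]

-- ===== VERDICT (by name: the statement is the Claim_ definition above) =====
theorem extract_optional_attributes_py_spec : Claim_equal_extract_optional_attributes_py := by
  intro facts_group _
  exact pv_main facts_group
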